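-- pv_equiv track=rewrite | github.com/LucaSforza/algoritmi2 | algo2/batteria3/es2f.py | es2f
-- ===== SOURCE A (Python) =====
-- def es2f(grafo:list[list[int]])->list[list[int]]: #O(n(n+m)) = O(nn+nm) = O(nm))
--     contIteraz = 0
--     gQuadro = [set() for _ in range(len(grafo))]
--     for i,nodo in enumerate(grafo):
--         contIteraz+=1
--         for adiNodo in nodo: # H(n+m)
--             contIteraz+=1
--             gQuadro[i].add(adiNodo)
--             for nodo in grafo[adiNodo]: # O(n)
--                 contIteraz+=1
--                 gQuadro[i].add(nodo)
--     return gQuadro,contIteraz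
-- ===== SOURCE B (Python) =====
-- def es2f(grafo: list[list[int]]) -> list[list[int]]:
--     # Count each neighbor's multiplicity across the whole graph, memoize one
--     # closure list per DISTINCT neighbor, assemble the 2-hop sets from the memo,
--     # and get the iteration count as a multiplicity-weighted degree sum.
--     occ = {}
--     for row in grafo:
--         for a in row:
--             occ[a] = occ.get(a, 0) + 1
--     closure = {a: [a] + grafo[a] for a in occ}
--     gQuadro = [set(x for a in row for x in closure[a]) for row in grafo]
--     contIteraz = (len(grafo)
--                   + sum(occ.values())
--                   + sum(c * (len(closure[a]) - 1) for a, c in occ.items()))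
--     return gQuadro, contIteraz
-- ===== Notes on version B (the rewrite author's own statement) =====
-- stated objective: alternative
-- what changed: B replaces A's single triple-nested counting loop by staged aggregation: it builds a multiplicity counter of all neighbor occurrences, memoizes one closure list per distinct neighbor in a dict, assembles each 2-hop set from that memo table, and computes the iteration counter as a multiplicity-weighted degree sum over the distinct neighbors instead of incrementing per step.
import Mathlib
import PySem

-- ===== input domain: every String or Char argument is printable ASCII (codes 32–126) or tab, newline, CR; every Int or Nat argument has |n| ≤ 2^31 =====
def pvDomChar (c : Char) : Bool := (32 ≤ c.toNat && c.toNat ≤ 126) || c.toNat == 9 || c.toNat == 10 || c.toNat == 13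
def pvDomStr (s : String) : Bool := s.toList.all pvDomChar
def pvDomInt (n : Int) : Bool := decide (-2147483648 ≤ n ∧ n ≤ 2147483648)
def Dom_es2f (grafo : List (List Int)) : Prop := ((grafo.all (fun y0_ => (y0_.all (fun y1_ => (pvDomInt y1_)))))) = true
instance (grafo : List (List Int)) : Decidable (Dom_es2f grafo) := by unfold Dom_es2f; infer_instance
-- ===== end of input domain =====

-- B precomputes a neighbor-multiplicity counter and a memoized closure table keyed by the
-- distinct neighbors, assembles each 2-hop set from the memo and derives the iteration
-- counter as a multiplicity-weighted degree sum (objective: alternative).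


-- ===== PORT A =====
-- the innermost two loops of A, acting on (gQuadro[i], contIteraz)
def es2fInner (grafo : List (List Int)) (nodo : List Int) (st : PySem.Set Int × Int) :
    PySem.Set Int × Int :=
  nodo.foldl (fun st2 adiNodo =>
    (PySem.List.pyGetD grafo adiNodo []).foldl
      (fun st3 n => (st3.1.add n, st3.2 + 1))
      (st2.1.add adiNodo, st2.2 + 1)) st

def es2f (grafo : List (List Int)) : List (List Int) × Int :=
  let res := (PySem.List.enumerate grafo).foldl
    (fun (st : List (PySem.Set Int) × Int) p =>
      let inner := es2fInner grafo p.2 (PySem.List.pyGetD st.1 p.1 PySem.Set.empty, st.2 + 1)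
      (PySem.List.pySetD st.1 p.1 inner.1, inner.2))
    (List.replicate grafo.length PySem.Set.empty, 0)
  res

-- ===== PORT B =====
def es2f_alt (grafo : List (List Int)) : List (List Int) × Int :=
  let occ : PySem.Dict Int Int :=
    grafo.foldl (fun d row => row.foldl (fun d a => d.insert a (d.getD a 0 + 1)) d)
      PySem.Dict.empty
  let closure : PySem.Dict Int (List Int) :=
    occ.keys.foldl (fun c a => c.insert a (a :: PySem.List.pyGetD grafo a []))
      PySem.Dict.empty
  let gQuadro := grafo.map (fun row =>
    PySem.Set.ofList (row.flatMap (fun a => closure.getD a [])))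
  let contIteraz : Int := (grafo.length : Int)
    + occ.values.sum
    + (occ.items.map (fun p => p.2 * (((closure.getD p.1 []).length : Int) - 1))).sum
  (gQuadro, contIteraz)

-- ===== PRECONDITION & SPEC =====
-- Pre_ excludes exactly the inputs where some adjacency index is out of range, on which
-- grafo[adiNodo] raises IndexError in both A and B.
def Pre_es2f (grafo : List (List Int)) : Prop :=
  ∀ row ∈ grafo, ∀ a ∈ row, PySem.Raise.InRange grafo.length a
instance (grafo : List (List Int)) : Decidable (Pre_es2f grafo) := by
  unfold Pre_es2f; infer_instance
def pvWitness_es2f : List (List Int) := [[1, 0], [0, -2]]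

def Spec_es2f (grafo : List (List Int)) (out : List (List Int) × Int) : Prop := out = es2f_alt grafo
instance (grafo : List (List Int)) (out : List (List Int) × Int) : Decidable (Spec_es2f grafo out) := by unfold Spec_es2f; infer_instance

-- ===== CLAIM (what is proved, stated in full; the proofs are below) =====
def Claim_equal_es2f : Prop := ∀ (grafo : List (List Int)), Dom_es2f grafo → Pre_es2f grafo → Spec_es2f grafo (es2f grafo)

-- ===== LEMMAS AND PROOFS =====

-- per-row result of B (foldl form; defeq to PySem.Set.ofList of the flattened frontier)
def rowSet (grafo : List (List Int)) (row : List Int) : PySem.Set Int :=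
  (row.flatMap (fun a => a :: PySem.List.pyGetD grafo a [])).foldl PySem.Set.add PySem.Set.empty

-- per-row iteration cost of A
def rowCost (grafo : List (List Int)) (row : List Int) : Int :=
  1 + (row.map (fun a => 1 + ((PySem.List.pyGetD grafo a []).length : Int))).sum

theorem foldl_add_count (l : List Int) : ∀ (s : PySem.Set Int) (c : Int),
    l.foldl (fun (st3 : PySem.Set Int × Int) n => (st3.1.add n, st3.2 + 1)) (s, c)
      = (l.foldl PySem.Set.add s, c + (l.length : Int)) := by
  induction l with
  | nil => simp
  | cons x xs ih =>
      intro s c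
      simp only [List.foldl_cons, List.length_cons]
      rw [ih]
      congr 1
      push_cast
      ring

theorem inner_eq (grafo : List (List Int)) (row : List Int) :
    ∀ (s : PySem.Set Int) (c : Int),
    es2fInner grafo row (s, c) =
      ((row.flatMap (fun a => a :: PySem.List.pyGetD grafo a [])).foldl PySem.Set.add s,
       c + (row.map (fun a => 1 + ((PySem.List.pyGetD grafo a []).length : Int))).sum) := by
  induction row with
  | nil => intro s c; simp [es2fInner]
  | cons a rest ih =>
      intro s c
      simp only [es2fInner, List.foldl_cons, List.flatMap_cons, List.map_cons,
        List.foldl_append, List.sum_cons] at *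
      rw [foldl_add_count, ih]
      congr 1
      ring

theorem outer_eq (grafo : List (List Int)) :
    ∀ (rows : List (List Int)) (acc : List (PySem.Set Int)) (c : Int),
    (PySem.List.enumerate rows (acc.length : Int)).foldl
      (fun (st : List (PySem.Set Int) × Int) p =>
        let inner := es2fInner grafo p.2 (PySem.List.pyGetD st.1 p.1 PySem.Set.empty, st.2 + 1)
        (PySem.List.pySetD st.1 p.1 inner.1, inner.2))
      (acc ++ List.replicate rows.length PySem.Set.empty, c)
    = (acc ++ rows.map (rowSet grafo), c + (rows.map (rowCost grafo)).sum) := by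
  intro rows
  induction rows with
  | nil => intro acc c; simp
  | cons row rest ih =>
      intro acc c
      rw [PySem.List.enumerate_cons, List.foldl_cons]
      dsimp only
      have hget : PySem.List.pyGetD
          (acc ++ List.replicate (row :: rest).length PySem.Set.empty)
          ((acc.length : Int)) PySem.Set.empty = PySem.Set.empty := by
        rw [PySem.List.pyGetD_natCast]
        simp [List.getD, List.replicate_succ]
      have hset : ∀ (v : PySem.Set Int), PySem.List.pySetD
          (acc ++ List.replicate (row :: rest).length PySem.Set.empty)
          ((acc.length : Int)) v
          = (acc ++ [v]) ++ List.replicate rest.length PySem.Set.empty := by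
        intro v
        rw [PySem.List.pySetD_natCast]
        simp [List.replicate_succ]
      rw [hget, inner_eq]
      dsimp only
      rw [hset]
      have hlen : ((acc.length : Int) + 1) = (((acc ++ [rowSet grafo row]).length : Int)) := by
        simp
      rw [show (List.foldl PySem.Set.add PySem.Set.empty
            (row.flatMap (fun a => a :: PySem.List.pyGetD grafo a []))) = rowSet grafo row from rfl,
          hlen, ih]
      simp only [List.map_cons, List.sum_cons, rowCost, Prod.mk.injEq]
      exact ⟨by simp, by ring⟩

-- B's nested counting loop is the counter of the flattened edge list
theorem foldl_nested_eq_flat (grafo : List (List Int)) :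
    ∀ (d0 : PySem.Dict Int Int),
    grafo.foldl (fun d row => row.foldl (fun d a => d.insert a (d.getD a 0 + 1)) d) d0
      = (grafo.flatMap (fun r => r)).foldl (fun d a => d.insert a (d.getD a 0 + 1)) d0 := by
  induction grafo with
  | nil => intro d0; rfl
  | cons r rs ih => intro d0; simp [List.foldl_append, ih]

-- weighted multiplicity sum over the distinct elements collapses to a plain sum
theorem sum_count_mul (l : List Int) (f : Int → Int) :
    ((PySem.Set.ofList l).map (fun x => (l.count x : Int) * f x)).sum = (l.map f).sum := by
  have hfin : (PySem.Set.ofList l).toFinset = l.toFinset := by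
    apply Finset.ext
    intro x
    simp [List.mem_toFinset, PySem.Set.mem_ofList]
  have hnd := PySem.Set.nodup_ofList (xs := l)
  have h1 : ∑ x ∈ (PySem.Set.ofList l).toFinset, (l.count x : Int) * f x
      = ((PySem.Set.ofList l).map (fun x => (l.count x : Int) * f x)).sum :=
    List.sum_toFinset _ hnd
  have h2 := Finset.sum_list_map_count l f
  rw [← h1, hfin, h2]
  apply Finset.sum_congr rfl
  intro x _
  push_cast [nsmul_eq_mul]
  ring

-- A's total cost, split into the three closed sums
theorem cost_sum (grafo : List (List Int)) : ∀ (rows : List (List Int)),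
    (rows.map (rowCost grafo)).sum
      = (rows.length : Int) + (rows.map (fun row => (row.length : Int))).sum
        + (rows.map (fun row =>
            (row.map (fun a => ((PySem.List.pyGetD grafo a []).length : Int))).sum)).sum := by
  intro rows
  induction rows with
  | nil => simp
  | cons row rest ih =>
      simp only [List.map_cons, List.sum_cons, List.length_cons, rowCost, ih]
      have : (row.map (fun a => 1 + ((PySem.List.pyGetD grafo a []).length : Int))).sum
          = (row.length : Int)
            + (row.map (fun a => ((PySem.List.pyGetD grafo a []).length : Int))).sum := by
        induction row with
        | nil => simp
        | cons a r ihr => simp only [List.map_cons, List.sum_cons, List.length_cons, ihr]; push_cast; ring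
      rw [this]; push_cast; ring

-- a sum over the flattened list is the sum of the per-row sums
theorem sum_map_flat (l : List (List Int)) (f : Int → Int) :
    ((l.flatMap (fun r => r)).map f).sum = (l.map (fun r => (r.map f).sum)).sum := by
  induction l with
  | nil => rfl
  | cons r rs _ => simp; rfl

theorem length_flat_int (l : List (List Int)) :
    ((l.flatMap (fun r => r)).length : Int) = (l.map (fun r => (r.length : Int))).sum := by
  induction l with
  | nil => rfl
  | cons r rs ih =>
      simp only [List.flatMap_cons, List.length_append, List.map_cons, List.sum_cons, ← ih]
      push_cast; ring

-- ===== VERDICT (by name: the statement is the Claim_ definition above) =====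
theorem es2f_spec : Claim_equal_es2f := by
  intro grafo _ _
  unfold Spec_es2f es2f es2f_alt
  have hA := outer_eq grafo grafo [] 0
  simp only [List.length_nil, Int.natCast_zero, List.nil_append, Int.zero_add] at hA
  simp only []
  rw [hA]
  set flat := grafo.flatMap (fun r => r) with hflat
  have hocc : grafo.foldl (fun d row => row.foldl (fun d a => d.insert a (d.getD a 0 + 1)) d)
      PySem.Dict.empty = PySem.Dict.counter flat := by
    rw [foldl_nested_eq_flat, PySem.Dict.foldl_insert_getD_add_one_eq_counter]
  rw [hocc]
  set adj : Int → List Int := fun a => PySem.List.pyGetD grafo a [] with hadj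
  set cl : PySem.Dict Int (List Int) :=
    (PySem.Dict.counter flat).keys.foldl
      (fun c a => c.insert a (a :: PySem.List.pyGetD grafo a [])) PySem.Dict.empty with hcl
  have hkeys : (PySem.Dict.counter flat).keys = PySem.Set.ofList flat :=
    PySem.Dict.keys_counter flat
  have hclitems : cl.items = (PySem.Set.ofList flat).map (fun a => (a, a :: adj a)) := by
    have hfresh : ∀ a ∈ (PySem.Dict.counter flat).keys,
        (PySem.Dict.empty : PySem.Dict Int (List Int)).contains a = false := by
      intro a _; exact PySem.Dict.contains_empty a
    have hnd : (((PySem.Dict.counter flat).keys).map (fun a => a)).Nodup := by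
      simp only [List.map_id_fun', id, hkeys]
      exact PySem.Set.nodup_ofList flat
    rw [hcl, PySem.Dict.items_foldl_insert_fresh _ (fun a => a) (fun a => a :: adj a) _ hfresh hnd,
      hkeys]
    rfl
  have hclnd : cl.keys.Nodup := by
    rw [hcl, PySem.Dict.keys_foldl_insert]
    simp only [PySem.Dict.keys_empty, PySem.Set.update_nil_left, hkeys,
      PySem.Set.ofList_ofList]
    exact PySem.Set.nodup_ofList flat
  have hgetcl : ∀ a ∈ flat, cl.getD a [] = a :: adj a := by
    intro a ha
    refine PySem.Dict.getD_of_mem_items cl ?_ hclnd []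
    rw [hclitems]
    exact List.mem_map.mpr ⟨a, (PySem.Set.mem_ofList flat a).mpr ha, rfl⟩
  refine Prod.ext ?_ ?_
  · -- the 2-hop sets agree
    simp only []
    apply List.map_congr_left
    intro row hrow
    have hmem : ∀ a ∈ row, a ∈ flat := fun a ha =>
      List.mem_flatMap.mpr ⟨row, hrow, ha⟩
    have : row.flatMap (fun a => cl.getD a []) = row.flatMap (fun a => a :: adj a) := by
      simp only [List.flatMap]
      exact congrArg List.flatten (List.map_congr_left (fun a ha => hgetcl a (hmem a ha)))
    rw [this]; rfl
  · -- the iteration counters agree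
    simp only []
    rw [cost_sum]
    have hvals : (PySem.Dict.counter flat).values.sum
        = (grafo.map (fun row => (row.length : Int))).sum := by
      rw [PySem.Dict.values_eq_map_keys _ (PySem.Dict.nodup_keys_counter flat) 0, hkeys]
      have : (PySem.Set.ofList flat).map (fun k => (PySem.Dict.counter flat).getD k 0)
          = (PySem.Set.ofList flat).map (fun k => (flat.count k : Int) * 1) := by
        apply List.map_congr_left
        intro k _
        rw [PySem.Dict.getD_counter]
        ring
      rw [this, sum_count_mul flat (fun _ => 1), ← length_flat_int,
        PySem.List.sum_map_const_int]
      ring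
    have hitems : ((PySem.Dict.counter flat).items.map
          (fun p => p.2 * (((cl.getD p.1 []).length : Int) - 1))).sum
        = (grafo.map (fun row =>
            (row.map (fun a => ((PySem.List.pyGetD grafo a []).length : Int))).sum)).sum := by
      rw [PySem.Dict.items_counter, List.map_map]
      have : ((PySem.Set.ofList flat).map
            ((fun p : Int × Int => p.2 * (((cl.getD p.1 []).length : Int) - 1))
              ∘ (fun k => (k, (flat.count k : Int)))))
          = (PySem.Set.ofList flat).map
              (fun k => (flat.count k : Int) * ((adj k).length : Int)) := by
        apply List.map_congr_left
        intro k hk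
        simp only [Function.comp]
        rw [hgetcl k ((PySem.Set.mem_ofList flat k).mp hk)]
        simp only [List.length_cons]
        push_cast
        ring_nf
      rw [this, sum_count_mul flat (fun a => ((adj a).length : Int)), sum_map_flat]
    rw [hvals, hitems]
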